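-- pv_equiv track=rewrite | github.com/citer529212/media-corpus-analyzer | corpus_analyzer_webapp/app.py | _assign_keyword_category
-- ===== SOURCE A (Python) =====
-- from typing import Dict, List, Optional, Tuple
--
-- REFERENT_CATEGORY_KEYWORDS: Dict[str, Dict[str, List[str]]] = {
--     "China": {
--         "Leadership": ["xi", "jinping", "beijing", "cpc", "ccp", "prc", "communist party"],
--         "Economy": ["yuan", "renminbi", "economy", "trade", "bri", "belt and road", "huawei", "tiktok", "alibaba"],
--         "Security": ["taiwan", "south china sea", "pla", "xinjiang", "sanction", "military"],
--         "Culture": ["culture", "confucius", "cinema", "music", "sport", "olympic"],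
--     },
--     "USA": {
--         "Leadership": ["biden", "trump", "white house", "washington", "congress", "senate"],
--         "Economy": ["dollar", "federal reserve", "treasury", "wall street", "economy", "tariff", "trade"],
--         "Security": ["pentagon", "nato", "military", "sanction", "defense", "state department"],
--         "Culture": ["american culture", "hollywood", "silicon valley", "music", "sport"],
--     },
--     "Russia": {
--         "Leadership": ["putin", "kremlin", "moscow", "lavrov", "medvedev"],
--         "Economy": ["ruble", "economy", "energy", "gazprom", "rosneft", "sanction"],
--         "Security": ["military", "ukraine war", "csto", "eaeu", "defense"],
--         "Culture": ["russian culture", "orthodox", "cinema", "sport"],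
--     },
-- }
--
-- def _split_marker_cell(cell: str) -> List[str]:
--     if not isinstance(cell, str) or not cell.strip():
--         return []
--     return [x.strip() for x in cell.split(";") if x.strip()]
--
-- def _assign_keyword_category(ref_country: str, matched_keywords: str) -> str:
--     cats = REFERENT_CATEGORY_KEYWORDS.get(ref_country, {})
--     kws = [k.casefold() for k in _split_marker_cell(matched_keywords)]
--     if not kws:
--         return "other"
--     matched = []
--     for cat, hints in cats.items():
--         hh = [h.casefold() for h in hints]
--         if any(any(h in kw for h in hh) for kw in kws):
--             matched.append(cat)
--     return "; ".join(matched) if matched else "other"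
-- ===== SOURCE B (Python) =====
-- from typing import Dict, List
--
-- REFERENT_CATEGORY_KEYWORDS: Dict[str, Dict[str, List[str]]] = {
--     "China": {
--         "Leadership": ["xi", "jinping", "beijing", "cpc", "ccp", "prc", "communist party"],
--         "Economy": ["yuan", "renminbi", "economy", "trade", "bri", "belt and road", "huawei", "tiktok", "alibaba"],
--         "Security": ["taiwan", "south china sea", "pla", "xinjiang", "sanction", "military"],
--         "Culture": ["culture", "confucius", "cinema", "music", "sport", "olympic"],
--     },
--     "USA": {
--         "Leadership": ["biden", "trump", "white house", "washington", "congress", "senate"],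
--         "Economy": ["dollar", "federal reserve", "treasury", "wall street", "economy", "tariff", "trade"],
--         "Security": ["pentagon", "nato", "military", "sanction", "defense", "state department"],
--         "Culture": ["american culture", "hollywood", "silicon valley", "music", "sport"],
--     },
--     "Russia": {
--         "Leadership": ["putin", "kremlin", "moscow", "lavrov", "medvedev"],
--         "Economy": ["ruble", "economy", "energy", "gazprom", "rosneft", "sanction"],
--         "Security": ["military", "ukraine war", "csto", "eaeu", "defense"],
--         "Culture": ["russian culture", "orthodox", "cinema", "sport"],
--     },
-- }
--
-- def _split_marker_cell(cell: str) -> List[str]: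
--     if not isinstance(cell, str) or not cell.strip():
--         return []
--     return [x.strip() for x in cell.split(";") if x.strip()]
--
-- # Precomputed per country: the category names in table order, and one flat
-- # list of (hint, category-index) pairs.  A category matches iff its bit ends
-- # up set in the mask accumulated over a single scan of the flat table.
-- _CAT_NAMES: Dict[str, List[str]] = {
--     country: list(cats) for country, cats in REFERENT_CATEGORY_KEYWORDS.items()
-- }
-- _FLAT_HINTS: Dict[str, List] = {
--     country: [(h, i) for i, hints in enumerate(cats.values()) for h in hints]
--     for country, cats in REFERENT_CATEGORY_KEYWORDS.items()
-- }
--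
-- def _assign_keyword_category(ref_country: str, matched_keywords: str) -> str:
--     kws = [k.casefold() for k in _split_marker_cell(matched_keywords)]
--     if not kws:
--         return "other"
--     mask = 0
--     for kw in kws:
--         for h, i in _FLAT_HINTS.get(ref_country, []):
--             if h.casefold() in kw:
--                 mask |= 1 << i
--     names = _CAT_NAMES.get(ref_country, [])
--     matched = [names[i] for i in range(len(names)) if mask >> i & 1]
--     return "; ".join(matched) if matched else "other"
-- ===== Notes on version B (the rewrite author's own statement) =====
-- stated objective: alternative
-- what changed: B replaces A's per-category nested loop over keywords and hints by a precomputed flat (hint, category-index) table scanned once per keyword to accumulate a bitmask of matched categories, which is then decoded into the category names in table order.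
import Mathlib
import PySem

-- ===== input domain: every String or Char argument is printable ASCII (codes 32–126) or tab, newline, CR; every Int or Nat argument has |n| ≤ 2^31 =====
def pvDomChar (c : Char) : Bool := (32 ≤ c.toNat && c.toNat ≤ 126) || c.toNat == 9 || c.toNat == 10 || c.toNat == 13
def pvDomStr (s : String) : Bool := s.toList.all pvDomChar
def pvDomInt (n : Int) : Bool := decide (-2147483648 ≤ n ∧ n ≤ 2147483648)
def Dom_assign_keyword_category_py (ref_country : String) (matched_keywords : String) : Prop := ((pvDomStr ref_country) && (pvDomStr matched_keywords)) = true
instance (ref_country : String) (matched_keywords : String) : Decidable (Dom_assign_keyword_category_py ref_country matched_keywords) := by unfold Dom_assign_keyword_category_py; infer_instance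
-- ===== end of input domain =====

-- B replaces A's per-category nested keyword loop by a single scan of a precomputed
-- flat (hint, category-index) table that accumulates a bitmask, decoded into category
-- names at the end (objective: alternative algorithm/data structure, same results).


-- shared module context: REFERENT_CATEGORY_KEYWORDS and _split_marker_cell
def pvRefCatKeywords : PySem.Dict String (PySem.Dict String (List String)) := PySem.Dict.mk
  [("China", PySem.Dict.mk
      [("Leadership", ["xi", "jinping", "beijing", "cpc", "ccp", "prc", "communist party"]),
       ("Economy", ["yuan", "renminbi", "economy", "trade", "bri", "belt and road", "huawei", "tiktok", "alibaba"]),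
       ("Security", ["taiwan", "south china sea", "pla", "xinjiang", "sanction", "military"]),
       ("Culture", ["culture", "confucius", "cinema", "music", "sport", "olympic"])]),
   ("USA", PySem.Dict.mk
      [("Leadership", ["biden", "trump", "white house", "washington", "congress", "senate"]),
       ("Economy", ["dollar", "federal reserve", "treasury", "wall street", "economy", "tariff", "trade"]),
       ("Security", ["pentagon", "nato", "military", "sanction", "defense", "state department"]),
       ("Culture", ["american culture", "hollywood", "silicon valley", "music", "sport"])]),
   ("Russia", PySem.Dict.mk
      [("Leadership", ["putin", "kremlin", "moscow", "lavrov", "medvedev"]),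
       ("Economy", ["ruble", "economy", "energy", "gazprom", "rosneft", "sanction"]),
       ("Security", ["military", "ukraine war", "csto", "eaeu", "defense"]),
       ("Culture", ["russian culture", "orthodox", "cinema", "sport"])])]

def pvSplitMarkerCell (cell : String) : List String :=
  if PySem.Str.strip cell = "" then []
  -- sep ";" is nonempty, so Python's cell.split(";") never raises: split? is some
  else (((PySem.Str.split? cell ";").getD []).filter (fun x => !(PySem.Str.strip x == ""))).map
        (fun x => PySem.Str.strip x)

-- ===== PORT A =====
def assign_keyword_category_py (ref_country : String) (matched_keywords : String) : String :=
  let cats := PySem.Dict.getD pvRefCatKeywords ref_country PySem.Dict.empty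
  let kws := (pvSplitMarkerCell matched_keywords).map PySem.Str.lower
  if kws = [] then "other"
  else
    let matched := cats.items.foldl (fun matched p =>
      let hh := p.2.map PySem.Str.lower
      if kws.any (fun kw => hh.any (fun h => PySem.Str.isIn h kw)) then matched ++ [p.1]
      else matched) ([] : List String)
    if matched = [] then "other" else PySem.Str.join "; " matched

-- ===== PORT B =====
-- Python B's module-level precomputed tables _CAT_NAMES and _FLAT_HINTS (their literal values)
def pvCatNames : PySem.Dict String (List String) := PySem.Dict.mk
  [("China", ["Leadership", "Economy", "Security", "Culture"]),
   ("USA", ["Leadership", "Economy", "Security", "Culture"]),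
   ("Russia", ["Leadership", "Economy", "Security", "Culture"])]

def pvFlatHints : PySem.Dict String (List (String × Nat)) := PySem.Dict.mk
  [("China",
     [("xi", 0), ("jinping", 0), ("beijing", 0), ("cpc", 0), ("ccp", 0), ("prc", 0), ("communist party", 0),
      ("yuan", 1), ("renminbi", 1), ("economy", 1), ("trade", 1), ("bri", 1), ("belt and road", 1), ("huawei", 1), ("tiktok", 1), ("alibaba", 1),
      ("taiwan", 2), ("south china sea", 2), ("pla", 2), ("xinjiang", 2), ("sanction", 2), ("military", 2),
      ("culture", 3), ("confucius", 3), ("cinema", 3), ("music", 3), ("sport", 3), ("olympic", 3)]),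
   ("USA",
     [("biden", 0), ("trump", 0), ("white house", 0), ("washington", 0), ("congress", 0), ("senate", 0),
      ("dollar", 1), ("federal reserve", 1), ("treasury", 1), ("wall street", 1), ("economy", 1), ("tariff", 1), ("trade", 1),
      ("pentagon", 2), ("nato", 2), ("military", 2), ("sanction", 2), ("defense", 2), ("state department", 2),
      ("american culture", 3), ("hollywood", 3), ("silicon valley", 3), ("music", 3), ("sport", 3)]),
   ("Russia",
     [("putin", 0), ("kremlin", 0), ("moscow", 0), ("lavrov", 0), ("medvedev", 0),
      ("ruble", 1), ("economy", 1), ("energy", 1), ("gazprom", 1), ("rosneft", 1), ("sanction", 1),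
      ("military", 2), ("ukraine war", 2), ("csto", 2), ("eaeu", 2), ("defense", 2),
      ("russian culture", 3), ("orthodox", 3), ("cinema", 3), ("sport", 3)])]

def assign_keyword_category_py_alt (ref_country : String) (matched_keywords : String) : String :=
  let kws := (pvSplitMarkerCell matched_keywords).map PySem.Str.lower
  if kws = [] then "other"
  else
    let flat := PySem.Dict.getD pvFlatHints ref_country []
    let mask := kws.foldl (fun mask kw =>
      flat.foldl (fun mask p =>
        if PySem.Str.isIn (PySem.Str.lower p.1) kw then mask ||| (1 <<< p.2) else mask) mask) 0
    let names := PySem.Dict.getD pvCatNames ref_country []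
    let matched := ((List.range names.length).filter (fun i => (mask >>> i) &&& 1 == 1)).map
      (fun i => names.getD i "")
    if matched = [] then "other" else PySem.Str.join "; " matched

-- ===== PRECONDITION & SPEC =====
def Spec_assign_keyword_category_py (ref_country : String) (matched_keywords : String) (out : String) : Prop := out = assign_keyword_category_py_alt ref_country matched_keywords
instance (ref_country : String) (matched_keywords : String) (out : String) : Decidable (Spec_assign_keyword_category_py ref_country matched_keywords out) := by unfold Spec_assign_keyword_category_py; infer_instance

-- ===== CLAIM (what is proved, stated in full; the proofs are below) =====
def Claim_equal_assign_keyword_category_py : Prop := ∀ (ref_country : String) (matched_keywords : String), Dom_assign_keyword_category_py ref_country matched_keywords → Spec_assign_keyword_category_py ref_country matched_keywords (assign_keyword_category_py ref_country matched_keywords)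

-- ===== LEMMAS AND PROOFS =====

lemma pv_testBit_one_shiftLeft (k i : Nat) : (1 <<< k).testBit i = (k == i) := by
  rw [Nat.shiftLeft_eq, one_mul, Nat.testBit_two_pow]
  rw [Bool.eq_iff_iff]; simp

lemma pv_testBit_inner (F : List (String × Nat)) (kw : String) :
    ∀ (m i : Nat),
      (F.foldl (fun m p => if PySem.Str.isIn (PySem.Str.lower p.1) kw then m ||| (1 <<< p.2) else m) m).testBit i
      = (m.testBit i || F.any (fun p => PySem.Str.isIn (PySem.Str.lower p.1) kw && p.2 == i)) := by
  induction F with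
  | nil => simp
  | cons p F ih =>
    intro m i
    rw [List.foldl_cons, List.any_cons]
    by_cases hb : PySem.Str.isIn (PySem.Str.lower p.1) kw = true
    · rw [if_pos hb, ih, Nat.testBit_or, pv_testBit_one_shiftLeft, hb]
      simp only [Bool.true_and]
      rw [Bool.eq_iff_iff]; simp only [Bool.or_eq_true]; tauto
    · rw [if_neg hb, ih]
      simp only [Bool.not_eq_true] at hb
      rw [hb]
      simp only [Bool.false_and, Bool.false_or]

lemma pv_testBit_mask (F : List (String × Nat)) :
    ∀ (kws : List String) (m i : Nat),
      (kws.foldl (fun m kw =>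
        F.foldl (fun m p => if PySem.Str.isIn (PySem.Str.lower p.1) kw then m ||| (1 <<< p.2) else m) m) m).testBit i
      = (m.testBit i ||
         kws.any (fun kw => F.any (fun p => PySem.Str.isIn (PySem.Str.lower p.1) kw && p.2 == i))) := by
  intro kws
  induction kws with
  | nil => simp
  | cons kw kws ih =>
    intro m i
    rw [List.foldl_cons, List.any_cons, ih, pv_testBit_inner]
    rw [Bool.eq_iff_iff]; simp only [Bool.or_eq_true]; tauto


def pvFlatOf : Nat → List (String × List String) → List (String × Nat)
  | _, [] => []
  | i, (_, hs) :: rest => hs.map (fun h => (h, i)) ++ pvFlatOf (i+1) rest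


lemma pv_any_flatOf (kw : String) :
    ∀ (cats : List (String × List String)) (i j : Nat),
      (pvFlatOf i cats).any (fun p => PySem.Str.isIn (PySem.Str.lower p.1) kw && p.2 == j)
      = ((cats.getD (j - i) ("", [])).2.any (fun h => PySem.Str.isIn (PySem.Str.lower h) kw)
          && (decide (i ≤ j) && decide (j < i + cats.length))) := by
  intro cats
  induction cats with
  | nil => intro i j; simp [pvFlatOf]
  | cons c rest ih =>
    intro i j
    rw [pvFlatOf, List.any_append, List.any_map, ih]
    simp only [Function.comp_def, List.length_cons]
    by_cases hij : i = j
    · subst hij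
      simp [show i < i + (rest.length + 1) from by omega, show ¬ (i + 1 ≤ i) from by omega]
    · by_cases hlt : i < j
      · have h1 : j - i = (j - (i+1)) + 1 := by omega
        rw [h1, List.getD_cons_succ]
        simp [hij, show (i ≤ j) ↔ (i + 1 ≤ j) from by omega,
              show (j < i + (rest.length + 1)) ↔ (j < i + 1 + rest.length) from by omega]
      · have hj : j < i := by omega
        rw [Nat.sub_eq_zero_of_le (le_of_lt hj), List.getD_cons_zero]
        simp [hij, show ¬ (i ≤ j) from by omega, show ¬ (i + 1 ≤ j) from by omega]

lemma pv_filter_map_index :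
    ∀ (cats : List (String × List String)) (p : String × List String → Bool),
      (cats.filter p).map Prod.fst =
      ((List.range cats.length).filter (fun j => p (cats.getD j ("", [])))).map
        (fun j => (cats.map Prod.fst).getD j "") := by
  intro cats
  induction cats with
  | nil => simp
  | cons c rest ih =>
    intro p
    rw [List.length_cons, List.range_succ_eq_map]
    simp only [List.filter_cons, List.getD_cons_zero, List.filter_map,
               Function.comp_def, List.getD_cons_succ, List.map_cons]
    by_cases hp : p c = true
    · simp only [hp, if_true, List.map_cons, List.getD_cons_zero, List.map_map,
                 Function.comp_def, Nat.succ_eq_add_one, List.getD_cons_succ]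
      rw [ih p]
    · simp only [hp, Bool.false_eq_true, if_false, List.map_map,
                 Function.comp_def, Nat.succ_eq_add_one, List.getD_cons_succ]
      rw [ih p]

lemma pv_bit_eq_testBit (m i : Nat) : ((m >>> i) &&& 1 == 1) = m.testBit i := by
  simp [Nat.testBit, Nat.and_one_is_mod]

lemma pv_main (cats : List (String × List String)) (kws : List String) :
    cats.foldl (fun matched p =>
      if kws.any (fun kw => (p.2.map PySem.Str.lower).any (fun h => PySem.Str.isIn h kw))
      then matched ++ [p.1] else matched) ([] : List String)
    = ((List.range (cats.map Prod.fst).length).filter (fun i =>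
        ((kws.foldl (fun m kw => (pvFlatOf 0 cats).foldl (fun m p =>
            if PySem.Str.isIn (PySem.Str.lower p.1) kw then m ||| (1 <<< p.2) else m) m) 0) >>> i) &&& 1 == 1)).map
        (fun i => (cats.map Prod.fst).getD i "") := by
  rw [PySem.List.foldl_append_if, List.nil_append, pv_filter_map_index, List.length_map]
  congr 1
  apply List.filter_congr
  intro j hj
  rw [List.mem_range] at hj
  rw [pv_bit_eq_testBit, pv_testBit_mask, Nat.zero_testBit, Bool.false_or]
  simp only [pv_any_flatOf]
  simp [List.any_map, Function.comp_def, hj]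

-- the four tables a country can yield (A's cats, B's flat and names together)
lemma pv_tables_cases (ref : String) :
    (ref = "China" ∨ ref = "USA" ∨ ref = "Russia") ∨
    (PySem.Dict.getD pvRefCatKeywords ref PySem.Dict.empty = PySem.Dict.empty ∧
     PySem.Dict.getD pvFlatHints ref [] = [] ∧
     PySem.Dict.getD pvCatNames ref [] = []) := by
  by_cases h1 : ref = "China"
  · exact Or.inl (Or.inl h1)
  by_cases h2 : ref = "USA"
  · exact Or.inl (Or.inr (Or.inl h2))
  by_cases h3 : ref = "Russia"
  · exact Or.inl (Or.inr (Or.inr h3))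
  · refine Or.inr ⟨?_, ?_, ?_⟩ <;>
      rw [PySem.Dict.getD_eq_get?_getD] <;>
      simp [pvRefCatKeywords, pvFlatHints, pvCatNames, PySem.Dict.get?,
            Ne.symm h1, Ne.symm h2, Ne.symm h3]

-- ===== VERDICT (by name: the statement is the Claim_ definition above) =====
theorem assign_keyword_category_py_spec : Claim_equal_assign_keyword_category_py := by
  intro ref mk _
  unfold Spec_assign_keyword_category_py
  unfold assign_keyword_category_py assign_keyword_category_py_alt
  simp only []
  by_cases hk : (pvSplitMarkerCell mk).map PySem.Str.lower = []
  · simp [hk]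
  · simp only [if_neg hk]
    rcases pv_tables_cases ref with (h | h | h) | ⟨h1, h2, h3⟩
    · subst h
      rw [show PySem.Dict.getD pvFlatHints "China" []
            = pvFlatOf 0 (PySem.Dict.getD pvRefCatKeywords "China" PySem.Dict.empty).items from rfl,
          show PySem.Dict.getD pvCatNames "China" []
            = ((PySem.Dict.getD pvRefCatKeywords "China" PySem.Dict.empty).items).map Prod.fst from rfl,
          pv_main]
    · subst h
      rw [show PySem.Dict.getD pvFlatHints "USA" []
            = pvFlatOf 0 (PySem.Dict.getD pvRefCatKeywords "USA" PySem.Dict.empty).items from rfl,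
          show PySem.Dict.getD pvCatNames "USA" []
            = ((PySem.Dict.getD pvRefCatKeywords "USA" PySem.Dict.empty).items).map Prod.fst from rfl,
          pv_main]
    · subst h
      rw [show PySem.Dict.getD pvFlatHints "Russia" []
            = pvFlatOf 0 (PySem.Dict.getD pvRefCatKeywords "Russia" PySem.Dict.empty).items from rfl,
          show PySem.Dict.getD pvCatNames "Russia" []
            = ((PySem.Dict.getD pvRefCatKeywords "Russia" PySem.Dict.empty).items).map Prod.fst from rfl,
          pv_main]
    · rw [h1, h2, h3]
      rfl
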